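-- pv_equiv track=rewrite | github.com/Anishp-cell/SkillBridge-AI | ai/syllabus_intelligence/topic_extractor.py | split_into_courses
-- ===== SOURCE A (Python) =====
-- def split_into_courses(clean_text: str):
--     """
--     Robust course splitter using 'course type' as anchor.
--     Returns: dict { course_name: course_text }
--     """
--
--     lines = [l.strip().lower() for l in clean_text.split("\n") if l.strip()]
--
--     courses = {}
--     current_course = None
--     buffer = []
--
--     for i, line in enumerate(lines):
--         # Anchor: course type
--         if line == "course type":
--             # The line BEFORE 'course type' is the course name
--             if i > 0:
--                 # Save previous course
--                 if current_course and buffer: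
--                     courses[current_course] = "\n".join(buffer).strip()
--                     buffer = []
--
--                 current_course = lines[i - 1]
--             continue
--
--         if current_course:
--             buffer.append(line)
--
--     # Save last course
--     if current_course and buffer:
--         courses[current_course] = "\n".join(buffer).strip()
--
--     return courses
-- ===== SOURCE B (Python) =====
-- def split_into_courses(clean_text: str):
--     """Anchor-index splitter: collect all 'course type' anchor positions once, then
--     slice out each course's text between consecutive anchors."""
--     lines = [l.strip().lower() for l in clean_text.split("\n") if l.strip()]
--     anchors = [i for i, l in enumerate(lines) if l == "course type" and i > 0]
--     courses = {}
--     for p, q in zip(anchors, anchors[1:] + [len(lines)]):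
--         seg = lines[p + 1:q]
--         if seg:
--             courses[lines[p - 1]] = "\n".join(seg).strip()
--     return courses
-- ===== Notes on version B (the rewrite author's own statement) =====
-- stated objective: simpler
-- what changed: Replaces A's running-buffer/current-course state machine over enumerate(lines) with a two-phase pass: first collect the list of 'course type' anchor indices, then slice each course's name and text directly out of lines between consecutive anchors.
import Mathlib
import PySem

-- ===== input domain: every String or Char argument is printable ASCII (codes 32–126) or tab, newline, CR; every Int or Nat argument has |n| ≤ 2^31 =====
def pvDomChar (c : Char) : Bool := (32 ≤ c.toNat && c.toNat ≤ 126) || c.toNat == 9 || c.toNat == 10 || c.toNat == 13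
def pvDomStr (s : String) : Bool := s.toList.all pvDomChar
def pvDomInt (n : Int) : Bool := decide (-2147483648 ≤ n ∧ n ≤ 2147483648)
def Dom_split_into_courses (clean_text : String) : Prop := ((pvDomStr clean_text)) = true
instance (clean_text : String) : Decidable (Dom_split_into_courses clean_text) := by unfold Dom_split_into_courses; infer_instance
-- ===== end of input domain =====

-- B replaces A's running-buffer/current-course state machine by an anchor-index list with
-- slices between consecutive anchors (objective: simpler decomposition, same exact result).

-- ===== PORT A =====

-- Python truthiness of current_course : Optional[str] (None and "" are falsy)
def pvTruthy : Option String → Bool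
  | none => false
  | some s => s != ""

-- lines = [l.strip().lower() for l in clean_text.split("\n") if l.strip()]
-- (split? is `some` whenever the separator is non-empty, as "\n" is)
def pvLines (clean_text : String) : List String :=
  (((PySem.Str.split? clean_text "\n").getD []).filter
      (fun l => PySem.Str.strip l != "")).map
    (fun l => PySem.Str.lower (PySem.Str.strip l))

-- if current_course and buffer: courses[current_course] = "\n".join(buffer).strip(); buffer = []
-- (cur.getD "" : when the guard holds, cur is `some c`, so the default is never read)
def pvSaveA (courses : PySem.Dict String String) (cur : Option String) (buf : List String) :
    PySem.Dict String String × List String :=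
  if pvTruthy cur && !buf.isEmpty then
    (courses.insert (cur.getD "") (PySem.Str.strip (PySem.Str.join "\n" buf)), [])
  else
    (courses, buf)

-- the `for i, line in enumerate(lines)` loop, index carried explicitly;
-- current_course = lines[i-1] is the pyGet? (always `some` since 0 < i < len lines)
def pvLoopA (lines : List String) :
    List String → Nat → PySem.Dict String String × Option String × List String →
    PySem.Dict String String × Option String × List String
  | [], _, st => st
  | line :: rest, i, (courses, cur, buf) =>
    if line == "course type" then
      if 0 < i then
        let (courses', buf') := pvSaveA courses cur buf
        pvLoopA lines rest (i + 1) (courses', PySem.List.pyGet? lines ((i : Int) - 1), buf')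
      else
        pvLoopA lines rest (i + 1) (courses, cur, buf)
    else
      pvLoopA lines rest (i + 1)
        (courses, cur, if pvTruthy cur then buf ++ [line] else buf)

def split_into_courses (clean_text : String) : List (String × String) :=
  let lines := pvLines clean_text
  let st := pvLoopA lines lines 0 (PySem.Dict.empty, none, [])
  (pvSaveA st.1 st.2.1 st.2.2).1.items

-- ===== PORT B =====

-- anchors = [i for i, l in enumerate(lines) if l == "course type" and i > 0]
def pvAnchors (lines : List String) : List Int :=
  ((PySem.List.enumerate lines).filter
      (fun il => il.2 == "course type" && decide (0 < il.1))).map (·.1)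

-- for p, q in zip(anchors, anchors[1:] + [len(lines)]): seg = lines[p+1:q]; …
-- (lines[p-1] is the pyGet?; always `some` since every anchor p has 0 < p < len lines)
def split_into_courses_alt (clean_text : String) : List (String × String) :=
  let lines := pvLines clean_text
  let anchors := pvAnchors lines
  ((anchors.zip (PySem.List.slice anchors (some 1) none ++ [(lines.length : Int)])).foldl
      (fun courses pq =>
        let seg := PySem.List.slice lines (some (pq.1 + 1)) (some pq.2)
        if !seg.isEmpty then
          courses.insert ((PySem.List.pyGet? lines (pq.1 - 1)).getD "")
            (PySem.Str.strip (PySem.Str.join "\n" seg))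
        else courses)
      PySem.Dict.empty).items

-- ===== PRECONDITION & SPEC =====
def Spec_split_into_courses (clean_text : String) (out : List (String × String)) : Prop := out = split_into_courses_alt clean_text
instance (clean_text : String) (out : List (String × String)) : Decidable (Spec_split_into_courses clean_text out) := by unfold Spec_split_into_courses; infer_instance

-- ===== CLAIM (what is proved, stated in full; the proofs are below) =====
def Claim_equal_split_into_courses : Prop := ∀ (clean_text : String), Dom_split_into_courses clean_text → Spec_split_into_courses clean_text (split_into_courses clean_text)

-- ===== LEMMAS AND PROOFS =====

-- proof-side vocabulary -----------------------------------------------------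

-- the course name attached to anchor position p (= lines[p-1])
def pvName (lines : List String) (p : Nat) : String :=
  (PySem.List.pyGet? lines ((p : Int) - 1)).getD ""

-- lines[s:q] for natural bounds
def pvSeg (lines : List String) (s q : Nat) : List String :=
  (lines.drop s).take (q - s)

-- record course c with text lines[s:q], if that slice is non-empty
def pvStep (lines : List String) (c : String) (s q : Nat)
    (d : PySem.Dict String String) : PySem.Dict String String :=
  if pvSeg lines s q ≠ [] then
    d.insert c (PySem.Str.strip (PySem.Str.join "\n" (pvSeg lines s q)))
  else d

-- process the remaining anchors ps, a course (name c, text starting at s) being open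
def pvCont (lines : List String) :
    List Nat → Nat → String → PySem.Dict String String → PySem.Dict String String
  | [], s, c, d => pvStep lines c s lines.length d
  | q :: ps, s, c, d => pvCont lines ps (q + 1) (pvName lines q) (pvStep lines c s q d)

-- process an anchor list from scratch (no course open yet)
def pvSpec (lines : List String) (ps : List Nat) (d : PySem.Dict String String) :
    PySem.Dict String String :=
  match ps with
  | [] => d
  | p :: ps => pvCont lines ps (p + 1) (pvName lines p) d

-- anchor positions of the suffix `rest` of lines, whose first element has index i
def pvAnchorsFrom : Nat → List String → List Nat
  | _, [] => []
  | i, l :: rest =>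
    if l = "course type" ∧ 0 < i then i :: pvAnchorsFrom (i + 1) rest
    else pvAnchorsFrom (i + 1) rest

-- basic facts ---------------------------------------------------------------

theorem pvLines_ne_empty (clean_text : String) : ∀ l ∈ pvLines clean_text, l ≠ "" := by
  intro l hl
  simp only [pvLines, List.mem_map, List.mem_filter] at hl
  obtain ⟨x, ⟨_, hx⟩, rfl⟩ := hl
  intro h
  have h2 : (PySem.Str.lower (PySem.Str.strip x)).toList = [] := by rw [h]; rfl
  rw [PySem.Str.toList_lower] at h2
  have h3 : (PySem.Str.strip x) = "" := by
    rw [← String.toList_eq_nil_iff]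
    simpa [PySem.Chars.lower] using h2
  rw [h3] at hx
  simp at hx

theorem pvName_eq (lines : List String) (i : Nat) (h1 : 1 ≤ i) :
    ∀ (hlt : i - 1 < lines.length),
      PySem.List.pyGet? lines ((i : Int) - 1) = some (lines[i - 1]'hlt) := by
  intro hlt
  have hc : ((i : Int) - 1) = ((i - 1 : Nat) : Int) := by omega
  rw [hc, PySem.List.pyGet?_natCast, List.getElem?_eq_getElem hlt]

theorem pvSeg_nil (lines : List String) (s : Nat) : pvSeg lines s s = [] := by
  simp [pvSeg]

theorem pvSeg_append (lines : List String) (s i : Nat) (hs : s ≤ i) (hi : i < lines.length) :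
    pvSeg lines s i ++ [lines[i]'hi] = pvSeg lines s (i + 1) := by
  simp only [pvSeg]
  have h1 : i + 1 - s = (i - s) + 1 := by omega
  rw [h1, List.take_add_one]
  have h2 : (lines.drop s)[i - s]? = some (lines[i]'hi) := by
    rw [List.getElem?_drop]
    have h3 : s + (i - s) = i := by omega
    rw [h3, List.getElem?_eq_getElem hi]
  rw [h2]
  rfl

-- the A side ----------------------------------------------------------------

-- the final save performed after the loop
def pvFin (st : PySem.Dict String String × Option String × List String) :
    PySem.Dict String String :=
  (pvSaveA st.1 st.2.1 st.2.2).1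

theorem pvSaveA_none (d : PySem.Dict String String) (buf : List String) :
    pvSaveA d none buf = (d, buf) := by
  simp [pvSaveA, pvTruthy]

theorem pvSaveA_some (d : PySem.Dict String String) (c : String) (buf : List String)
    (hc : c ≠ "") :
    pvSaveA d (some c) buf =
      if buf ≠ [] then
        (d.insert c (PySem.Str.strip (PySem.Str.join "\n" buf)), ([] : List String))
      else (d, buf) := by
  by_cases h : buf = [] <;> simp [pvSaveA, pvTruthy, hc, h]

theorem pvLoopA_post (lines : List String) (hne : ∀ l ∈ lines, l ≠ "") :
    ∀ (rest : List String) (i s : Nat) (c : String) (d : PySem.Dict String String),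
      lines.drop i = rest → i + rest.length = lines.length → 1 ≤ i → s ≤ i → c ≠ "" →
      pvFin (pvLoopA lines rest i (d, some c, pvSeg lines s i))
        = pvCont lines (pvAnchorsFrom i rest) s c d := by
  intro rest
  induction rest with
  | nil =>
    intro i s c d hdrop hlen h1i hs hc
    have hin : i = lines.length := by simpa using hlen
    simp only [pvLoopA, pvFin, pvAnchorsFrom, pvCont]
    rw [pvSaveA_some d c _ hc, ← hin]
    by_cases hb : pvSeg lines s i = []
    · rw [if_neg (by simp [hb])]
      simp [pvStep, hb]
    · rw [if_pos hb]
      simp [pvStep, hb]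
  | cons l rest' ih =>
    intro i s c d hdrop hlen h1i hs hc
    have hilt : i < lines.length := by
      have := congrArg List.length hdrop
      simp at this
      omega
    have hL : lines[i]'hilt = l := by
      have h0 : (lines.drop i)[0]'(by rw [hdrop]; simp) = l := by simp [hdrop]
      rw [List.getElem_drop] at h0
      simpa using h0
    have hdrop' : lines.drop (i + 1) = rest' := by
      rw [← List.tail_drop, hdrop]
      rfl
    have hlen' : (i + 1) + rest'.length = lines.length := by
      simp at hlen
      omega
    have hi1lt : i - 1 < lines.length := by omega
    simp only [pvLoopA]
    by_cases hl : l = "course type"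
    · rw [if_pos (by simp [hl]), if_pos (by omega : 0 < i)]
      rw [pvSaveA_some d c _ hc]
      have hname : PySem.List.pyGet? lines ((i : Int) - 1) = some (lines[i - 1]'hi1lt) :=
        pvName_eq lines i h1i hi1lt
      have hcname : lines[i - 1]'hi1lt ≠ "" := hne _ (List.getElem_mem _)
      have hpn : pvName lines i = lines[i - 1]'hi1lt := by simp [pvName, hname]
      have hanch : pvAnchorsFrom i (l :: rest') = i :: pvAnchorsFrom (i + 1) rest' := by
        simp [pvAnchorsFrom, hl]
        omega
      rw [hanch]
      by_cases hb : pvSeg lines s i = []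
      · rw [if_neg (by simp [hb])]
        rw [hname, hb, show ([] : List String) = pvSeg lines (i + 1) (i + 1) from
          (pvSeg_nil lines (i + 1)).symm]
        rw [ih (i + 1) (i + 1) _ d hdrop' hlen' (by omega) le_rfl hcname]
        simp [pvCont, pvStep, hb, hpn]
      · rw [if_pos hb]
        rw [hname, show ([] : List String) = pvSeg lines (i + 1) (i + 1) from
          (pvSeg_nil lines (i + 1)).symm]
        rw [ih (i + 1) (i + 1) _ _ hdrop' hlen' (by omega) le_rfl hcname]
        simp [pvCont, pvStep, hb, hpn]
    · rw [if_neg (by simp [hl])]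
      rw [show pvTruthy (some c) = true by simp [pvTruthy, hc]]
      simp only [if_true]
      rw [← hL, pvSeg_append lines s i hs hilt]
      rw [ih (i + 1) s c d hdrop' hlen' (by omega) (by omega) hc]
      simp [pvAnchorsFrom, hL, hl]

theorem pvLoopA_pre (lines : List String) (hne : ∀ l ∈ lines, l ≠ "") :
    ∀ (rest : List String) (i : Nat) (d : PySem.Dict String String),
      lines.drop i = rest → i + rest.length = lines.length →
      pvFin (pvLoopA lines rest i (d, none, []))
        = pvSpec lines (pvAnchorsFrom i rest) d := by
  intro rest
  induction rest with
  | nil =>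
    intro i d hdrop hlen
    simp [pvLoopA, pvFin, pvSaveA_none, pvAnchorsFrom, pvSpec]
  | cons l rest' ih =>
    intro i d hdrop hlen
    have hilt : i < lines.length := by
      have := congrArg List.length hdrop
      simp at this
      omega
    have hL : lines[i]'hilt = l := by
      have h0 : (lines.drop i)[0]'(by rw [hdrop]; simp) = l := by simp [hdrop]
      rw [List.getElem_drop] at h0
      simpa using h0
    have hdrop' : lines.drop (i + 1) = rest' := by
      rw [← List.tail_drop, hdrop]
      rfl
    have hlen' : (i + 1) + rest'.length = lines.length := by
      simp at hlen
      omega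
    simp only [pvLoopA]
    by_cases hl : l = "course type"
    · by_cases hi : 0 < i
      · rw [if_pos (by simp [hl]), if_pos hi]
        rw [pvSaveA_none d []]
        have hi1lt : i - 1 < lines.length := by omega
        have hname : PySem.List.pyGet? lines ((i : Int) - 1) = some (lines[i - 1]'hi1lt) :=
          pvName_eq lines i hi hi1lt
        have hcname : lines[i - 1]'hi1lt ≠ "" := hne _ (List.getElem_mem _)
        have hpn : pvName lines i = lines[i - 1]'hi1lt := by simp [pvName, hname]
        rw [hname, show ([] : List String) = pvSeg lines (i + 1) (i + 1) from
          (pvSeg_nil lines (i + 1)).symm]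
        rw [pvLoopA_post lines hne rest' (i + 1) (i + 1) _ d hdrop' hlen' (by omega) le_rfl
          hcname]
        have hanch : pvAnchorsFrom i (l :: rest') = i :: pvAnchorsFrom (i + 1) rest' := by
          simp [pvAnchorsFrom, hl]
          omega
        rw [hanch]
        simp [pvSpec, hpn]
      · rw [if_pos (by simp [hl]), if_neg hi]
        rw [ih (i + 1) d hdrop' hlen']
        have hi0 : i = 0 := by omega
        simp [pvAnchorsFrom, hl, hi0]
    · rw [if_neg (by simp [hl])]
      rw [show pvTruthy none = false by rfl]
      simp only [Bool.false_eq_true, if_false]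
      rw [ih (i + 1) d hdrop' hlen']
      simp [pvAnchorsFrom, hl]

-- the B side ----------------------------------------------------------------

theorem pvAnchorsFrom_enum (rest : List String) : ∀ (i : Nat),
    ((PySem.List.enumerate rest (i : Int)).filter
        (fun il => il.2 == "course type" && decide (0 < il.1))).map (·.1)
      = (pvAnchorsFrom i rest).map (Nat.cast) := by
  induction rest with
  | nil => intro i; simp [pvAnchorsFrom, PySem.List.enumerate]
  | cons l rest ih =>
    intro i
    rw [PySem.List.enumerate_cons]
    have hcast : ((i : Int) + 1) = ((i + 1 : Nat) : Int) := by push_cast; ring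
    rw [hcast]
    have hstep := ih (i + 1)
    rw [List.filter_cons]
    by_cases hl : l = "course type"
    · by_cases hi : 0 < i
      · simp only [hl, hi, beq_self_eq_true, Bool.true_and, decide_eq_true_eq, Nat.cast_pos]
        rw [if_pos trivial, List.map_cons, hstep]
        simp [pvAnchorsFrom, hi]
      · have hi0 : i = 0 := by omega
        subst hi0
        rw [if_neg (by simp), hstep]
        simp [pvAnchorsFrom]
    · rw [if_neg (by simp [hl]), hstep]
      simp [pvAnchorsFrom, hl]

theorem pvAnchors_eq (lines : List String) :
    pvAnchors lines = (pvAnchorsFrom 0 lines).map (Nat.cast) := by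
  have h := pvAnchorsFrom_enum lines 0
  simpa [pvAnchors] using h

-- B's loop body applied to a pair of natural anchor positions is pvStep
theorem pvStepB_eq (lines : List String) (d : PySem.Dict String String) (p q : Nat) :
    (if (!(PySem.List.slice lines (some ((p : Int) + 1)) (some (q : Int))).isEmpty) = true then
        d.insert ((PySem.List.pyGet? lines ((p : Int) - 1)).getD "")
          (PySem.Str.strip (PySem.Str.join "\n"
            (PySem.List.slice lines (some ((p : Int) + 1)) (some (q : Int)))))
      else d) = pvStep lines (pvName lines p) (p + 1) q d := by
  simp only [pvStep, pvSeg, pvName]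
  have h1 : ((p : Int) + 1) = ((p + 1 : Nat) : Int) := by push_cast; ring
  rw [h1, PySem.List.slice_natCast]
  by_cases h : List.take (q - (p + 1)) (lines.drop (p + 1)) = [] <;> simp [h]

theorem pvFoldB_cont (lines : List String) :
    ∀ (ps : List Nat) (p : Nat) (d : PySem.Dict String String),
      ((((p :: ps).map (Nat.cast : Nat → Int)).zip
          ((ps.map (Nat.cast : Nat → Int)) ++ [(lines.length : Int)])).foldl
        (fun courses pq =>
          let seg := PySem.List.slice lines (some (pq.1 + 1)) (some pq.2)
          if !seg.isEmpty then
            courses.insert ((PySem.List.pyGet? lines (pq.1 - 1)).getD "")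
              (PySem.Str.strip (PySem.Str.join "\n" seg))
          else courses)
        d)
      = pvCont lines ps (p + 1) (pvName lines p) d := by
  intro ps
  induction ps with
  | nil =>
    intro p d
    simp only [List.map_cons, List.map_nil, List.nil_append, List.zip_cons_cons, List.zip_nil_left,
      List.foldl_cons, List.foldl_nil]
    rw [pvStepB_eq lines d p lines.length]
    rfl
  | cons q qs ih =>
    intro p d
    simp only [List.map_cons, List.cons_append, List.zip_cons_cons, List.foldl_cons]
    rw [pvStepB_eq lines d p q]
    exact ih q (pvStep lines (pvName lines p) (p + 1) q d)

theorem pvFoldB_eq (lines : List String) (ps : List Nat) (d : PySem.Dict String String) :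
    (((ps.map (Nat.cast : Nat → Int)).zip
        (PySem.List.slice (ps.map (Nat.cast : Nat → Int)) (some 1) none ++ [(lines.length : Int)])).foldl
      (fun courses pq =>
        let seg := PySem.List.slice lines (some (pq.1 + 1)) (some pq.2)
        if !seg.isEmpty then
          courses.insert ((PySem.List.pyGet? lines (pq.1 - 1)).getD "")
            (PySem.Str.strip (PySem.Str.join "\n" seg))
        else courses)
      d) = pvSpec lines ps d := by
  rw [PySem.List.slice_from_one]
  cases ps with
  | nil => rfl
  | cons p ps =>
    have htail : (List.map (Nat.cast : Nat → Int) (p :: ps)).tail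
        = ps.map (Nat.cast : Nat → Int) := by simp
    rw [htail, pvFoldB_cont]
    rfl

-- ===== VERDICT (by name: the statement is the Claim_ definition above) =====
theorem split_into_courses_spec : Claim_equal_split_into_courses := by
  intro clean_text _
  show _ = _
  simp only [split_into_courses, split_into_courses_alt]
  rw [pvAnchors_eq, pvFoldB_eq]
  have h := pvLoopA_pre (pvLines clean_text) (pvLines_ne_empty clean_text)
      (pvLines clean_text) 0 PySem.Dict.empty rfl (by simp)
  exact congrArg PySem.Dict.items h
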